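-- pv_equiv track=rewrite | github.com/scijava/jgo | src/jgo/parse/coordinate.py | looks_like_main_class
-- ===== SOURCE A (Python) =====
-- def looks_like_main_class(s: str) -> bool:
--     """
--     Check if string could be a valid Java main class name.
--
--     A valid Java class name follows identifier rules for each dot-separated token:
--     - Must start with a letter, $, or _
--     - Can contain letters, digits, $, or _
--     - Cannot start with a digit
--
--     Args:
--         s: The string to examine
--
--     Returns:
--         True if the string follows Java identifier grammar (might be a class)
--         False if it violates Java identifier rules (definitely NOT a class)
--     """
--     if not s:
--         return False
--
--     # Split by dots for package-qualified names
--     tokens = s.split(".")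
--
--     for token in tokens:
--         if not token:  # Empty token (e.g., "com..Main")
--             return False
--
--         # First character: must be letter, $, or _
--         if not (token[0].isalpha() or token[0] in ("$", "_")):
--             return False
--
--         # Remaining characters: letters, digits, $, or _
--         for ch in token[1:]:
--             if not (ch.isalnum() or ch in ("$", "_")):
--                 return False
--
--     return True
-- ===== SOURCE B (Python) =====
-- def looks_like_main_class(s: str) -> bool:
--     """Single-pass state machine over s: no split, one boolean 'at token start'."""
--     at_start = True
--     for ch in s:
--         if ch == '.':
--             if at_start:
--                 return False
--             at_start = True
--         elif at_start:
--             if not (ch.isalpha() or ch in ('$', '_')):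
--                 return False
--             at_start = False
--         else:
--             if not (ch.isalnum() or ch in ('$', '_')):
--                 return False
--     return not at_start
-- ===== Notes on version B (the rewrite author's own statement) =====
-- stated objective: alternative
-- what changed: Replaces dot-splitting plus per-token first/rest character loops with a single left-to-right pass over the characters keeping one boolean state flag.
import Mathlib
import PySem

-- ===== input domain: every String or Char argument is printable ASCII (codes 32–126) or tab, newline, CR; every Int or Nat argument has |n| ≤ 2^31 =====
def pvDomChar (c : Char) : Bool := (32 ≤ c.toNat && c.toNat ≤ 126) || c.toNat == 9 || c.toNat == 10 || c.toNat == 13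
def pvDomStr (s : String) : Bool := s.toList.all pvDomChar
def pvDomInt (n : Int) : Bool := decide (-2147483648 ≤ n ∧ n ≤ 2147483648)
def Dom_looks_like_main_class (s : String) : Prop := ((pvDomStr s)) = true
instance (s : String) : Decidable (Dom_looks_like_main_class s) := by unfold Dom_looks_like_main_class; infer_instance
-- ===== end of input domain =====

-- B replaces split('.') + per-token loops by one single-pass state machine (objective: alternative).


-- ===== PORT A =====
-- token[0] test: letter, $ or _
def pvFirstOk (c : Char) : Bool := PySem.Chars.isalpha c || c == '$' || c == '_'
-- inner-loop test: letter, digit, $ or _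
def pvRestOk (c : Char) : Bool := PySem.Chars.isalnum c || c == '$' || c == '_'

-- one iteration of A's outer loop body, over the token's characters
def pvTokenOk (t : List Char) : Bool :=
  match t with
  | [] => false                                   -- "if not token: return False"
  | c :: rest =>
      if !pvFirstOk c then false
      else rest.all pvRestOk                      -- "for ch in token[1:]"

def looks_like_main_class (s : String) : Bool :=
  if s.toList = [] then false                     -- "if not s: return False"
  else (PySem.Chars.splitOn s.toList ['.']).all pvTokenOk

-- ===== PORT B =====
def pvAltGo : List Char → Bool → Bool
  | [], at_start => !at_start
  | c :: cs, at_start =>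
      if c == '.' then
        if at_start then false else pvAltGo cs true
      else if at_start then
        if pvFirstOk c then pvAltGo cs false else false
      else
        if pvRestOk c then pvAltGo cs false else false

def looks_like_main_class_alt (s : String) : Bool := pvAltGo s.toList true

-- ===== PRECONDITION & SPEC =====
def Spec_looks_like_main_class (s : String) (out : Bool) : Prop := out = looks_like_main_class_alt s
instance (s : String) (out : Bool) : Decidable (Spec_looks_like_main_class s out) := by unfold Spec_looks_like_main_class; infer_instance

-- ===== CLAIM (what is proved, stated in full; the proofs are below) =====
def Claim_equal_looks_like_main_class : Prop := ∀ (s : String), Dom_looks_like_main_class s → Spec_looks_like_main_class s (looks_like_main_class s)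

-- ===== LEMMAS AND PROOFS =====

-- simple recursive description of splitting on '.'
def pvSplitDot : List Char → List (List Char)
  | [] => [[]]
  | c :: rest =>
      if c = '.' then [] :: pvSplitDot rest
      else
        match pvSplitDot rest with
        | t :: ts => (c :: t) :: ts
        | [] => [[c]]

theorem pvSplitDot_ne_nil (cs : List Char) : pvSplitDot cs ≠ [] := by
  cases cs with
  | nil => simp [pvSplitDot]
  | cons c rest =>
      simp only [pvSplitDot]
      split
      · simp
      · split <;> simp_all

theorem pvSplitOn_go_eq (fuel : Nat) (l cur : List Char) (acc : List (List Char))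
    (h : l.length < fuel) :
    PySem.Chars.splitOn.go ['.'] fuel l cur acc =
      acc.reverse ++
        (match pvSplitDot l with
         | t :: ts => (cur.reverse ++ t) :: ts
         | [] => [cur.reverse]) := by
  induction fuel generalizing l cur acc with
  | zero => omega
  | succ fuel ih =>
      cases l with
      | nil => simp [PySem.Chars.splitOn.go, pvSplitDot]
      | cons c rest =>
          rw [PySem.Chars.splitOn.go]
          by_cases hc : c = '.'
          · subst hc
            simp only [List.isPrefixOf, BEq.rfl, Bool.true_and, if_pos, List.length_singleton, List.drop_one, List.tail_cons]
            rw [ih rest [] (cur.reverse :: acc) (by simpa using Nat.lt_of_succ_lt_succ h)]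
            simp only [pvSplitDot]
            cases hsd : pvSplitDot rest with
            | nil => exact absurd hsd (pvSplitDot_ne_nil rest)
            | cons t ts => simp
          · have hpre : List.isPrefixOf ['.'] (c :: rest) = false := by
              simp [List.isPrefixOf, Ne.symm hc]
            simp only [hpre, Bool.false_eq_true, if_neg, not_false_iff]
            rw [ih rest (c :: cur) acc (by simpa using Nat.lt_of_succ_lt_succ h)]
            simp only [pvSplitDot, if_neg hc]
            cases hsd : pvSplitDot rest with
            | nil => exact absurd hsd (pvSplitDot_ne_nil rest)
            | cons t ts => simp

theorem pvSplitOn_eq (cs : List Char) :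
    PySem.Chars.splitOn cs ['.'] = pvSplitDot cs := by
  unfold PySem.Chars.splitOn
  rw [pvSplitOn_go_eq cs.length.succ cs [] [] (Nat.lt_succ_self _)]
  cases hsd : pvSplitDot cs with
  | nil => exact absurd hsd (pvSplitDot_ne_nil cs)
  | cons t ts => simp

-- the tail-state invariant: pvAltGo from inside a token
def pvMidOk (cs : List Char) : Bool :=
  match pvSplitDot cs with
  | [] => true
  | t :: ts => t.all pvRestOk && ts.all pvTokenOk

theorem pvAltGo_eq (cs : List Char) :
    (pvAltGo cs true = (pvSplitDot cs).all pvTokenOk) ∧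
    (pvAltGo cs false = pvMidOk cs) := by
  induction cs with
  | nil => simp [pvAltGo, pvSplitDot, pvMidOk, pvTokenOk]
  | cons c rest ih =>
      obtain ⟨ih1, ih2⟩ := ih
      obtain ⟨t, ts, hsd⟩ : ∃ t ts, pvSplitDot rest = t :: ts := by
        cases h : pvSplitDot rest with
        | nil => exact absurd h (pvSplitDot_ne_nil rest)
        | cons t ts => exact ⟨t, ts, rfl⟩
      by_cases hc : c = '.'
      · subst hc
        constructor
        · simp [pvAltGo, pvSplitDot, pvTokenOk]
        · simp [pvAltGo, pvSplitDot, pvMidOk, hsd, ih1]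
      · have hcb : (c == '.') = false := by simp [hc]
        constructor
        · simp only [pvAltGo, hcb, Bool.false_eq_true, if_neg, not_false_iff, if_pos]
          by_cases hf : pvFirstOk c = true
          · simp [hf, ih2, pvSplitDot, hc, hsd, pvMidOk, pvTokenOk]
          · simp only [Bool.not_eq_true] at hf
            simp [hf, pvSplitDot, hc, hsd, pvTokenOk]
        · simp only [pvAltGo, hcb, Bool.false_eq_true, if_neg, not_false_iff]
          by_cases hf : pvRestOk c = true
          · simp [hf, ih2, pvSplitDot, hc, hsd, pvMidOk]
          · simp only [Bool.not_eq_true] at hf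
            simp [hf, pvSplitDot, hc, hsd, pvMidOk]

-- ===== VERDICT (by name: the statement is the Claim_ definition above) =====
theorem looks_like_main_class_spec : Claim_equal_looks_like_main_class := by
  intro s _
  unfold Spec_looks_like_main_class looks_like_main_class looks_like_main_class_alt
  rw [pvSplitOn_eq]
  cases hl : s.toList with
  | nil => simp [pvAltGo]
  | cons c rest =>
      simp only [if_neg (by simp : (c :: rest : List Char) ≠ [])]
      exact ((pvAltGo_eq (c :: rest)).1).symm
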